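-- pv_equiv track=rewrite | github.com/cement001/TowerOfHanoi | TowerOfHanoi.py | isNotSequential
-- ===== SOURCE A (Python) =====
-- def isNotSequential(p, newV):
-- 	temp = []
-- 	for n in p:
-- 		temp.append(n)
-- 	temp.append(newV)
-- 	seq = False
-- 	for g in range(len(temp)-1):
-- 		if temp[g] != temp[g+1]:
-- 			seq = True
-- 	return seq
-- ===== SOURCE B (Python) =====
-- def isNotSequential(p, newV):
--     ref = p[0] if p else newV
--     return any(x != ref for x in p) or newV != ref
-- ===== Notes on version B (the rewrite author's own statement) =====
-- stated objective: simpler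
-- what changed: Replaces the copy-then-adjacent-pair index scan with a single pass comparing every element (and newV) against one fixed reference value, the first element of the concatenation.
import Mathlib
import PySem

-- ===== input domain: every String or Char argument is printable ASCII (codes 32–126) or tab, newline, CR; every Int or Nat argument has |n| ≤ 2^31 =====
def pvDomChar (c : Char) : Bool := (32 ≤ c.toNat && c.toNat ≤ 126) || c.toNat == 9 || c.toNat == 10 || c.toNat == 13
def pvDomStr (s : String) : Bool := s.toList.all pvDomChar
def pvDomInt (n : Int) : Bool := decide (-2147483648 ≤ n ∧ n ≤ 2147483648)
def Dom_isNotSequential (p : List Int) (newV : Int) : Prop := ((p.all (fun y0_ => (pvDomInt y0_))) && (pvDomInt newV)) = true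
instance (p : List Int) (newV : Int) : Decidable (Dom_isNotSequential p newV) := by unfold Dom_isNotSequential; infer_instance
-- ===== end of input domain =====

-- B replaces A's copy-then-adjacent-pair index scan by a single pass comparing every
-- element (and newV) against one fixed reference, the first element of the concatenation (objective: simpler).

-- ===== PORT A =====
def isNotSequential (p : List Int) (newV : Int) : Bool :=
  let temp := p.foldl (fun acc n => acc ++ [n]) []
  let temp := temp ++ [newV]
  (PySem.List.pyRange 0 ((temp.length : Int) - 1) 1).foldl
    (fun seq g =>
      if PySem.List.pyGetD temp g 0 ≠ PySem.List.pyGetD temp (g + 1) 0 then true else seq)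
    false

-- ===== PORT B =====
def isNotSequential_alt (p : List Int) (newV : Int) : Bool :=
  let ref := p.headD newV
  p.any (fun x => x ≠ ref) || (newV ≠ ref)

-- ===== PRECONDITION & SPEC =====
def Spec_isNotSequential (p : List Int) (newV : Int) (out : Bool) : Prop := out = isNotSequential_alt p newV
instance (p : List Int) (newV : Int) (out : Bool) : Decidable (Spec_isNotSequential p newV out) := by unfold Spec_isNotSequential; infer_instance

-- ===== CLAIM (what is proved, stated in full; the proofs are below) =====
def Claim_equal_isNotSequential : Prop := ∀ (p : List Int) (newV : Int), Dom_isNotSequential p newV → Spec_isNotSequential p newV (isNotSequential p newV)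

-- ===== LEMMAS AND PROOFS =====

-- adjacent-difference predicate on a list, structurally
def adjDiff : List Int → Bool
  | [] => false
  | [_] => false
  | a :: b :: t => (a ≠ b : Bool) || adjDiff (b :: t)

-- A's foldl over an ever-true-latching if is List.any
theorem foldl_latch {α : Type} (l : List α) (P : α → Prop) [DecidablePred P] (b : Bool) :
    l.foldl (fun seq g => if P g then true else seq) b
      = (b || l.any fun g => decide (P g)) := by
  induction l generalizing b with
  | nil => simp
  | cons a t ih =>
    simp only [List.foldl_cons, List.any_cons, ih]
    by_cases h : P a <;> simp [h]

-- the element-copying first loop is the identity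
theorem foldl_copy (p : List Int) (acc : List Int) :
    p.foldl (fun a n => a ++ [n]) acc = acc ++ p := by
  induction p generalizing acc with
  | nil => simp
  | cons x t ih => simp [ih]

-- the index-based adjacent scan equals adjDiff
theorem any_range_adj (l : List Int) :
    (List.range (l.length - 1)).any
      (fun k => decide (l.getD k 0 ≠ l.getD (k + 1) 0)) = adjDiff l := by
  induction l with
  | nil => simp [adjDiff]
  | cons a t ih =>
    cases t with
    | nil => simp [adjDiff]
    | cons b t' =>
      have hlen : (a :: b :: t').length - 1 = ((b :: t').length - 1) + 1 := by
        simp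
      rw [hlen, List.range_succ_eq_map, List.any_cons, List.any_map]
      rw [show adjDiff (a :: b :: t') = ((a ≠ b : Bool) || adjDiff (b :: t')) from rfl, ← ih]
      rfl

theorem isNotSequential_eq_adjDiff (p : List Int) (newV : Int) :
    isNotSequential p newV = adjDiff (p ++ [newV]) := by
  show (PySem.List.pyRange 0 (((p.foldl (fun acc n => acc ++ [n]) [] ++ [newV]).length : Int) - 1) 1).foldl
      (fun seq g =>
        if PySem.List.pyGetD (p.foldl (fun acc n => acc ++ [n]) [] ++ [newV]) g 0
             ≠ PySem.List.pyGetD (p.foldl (fun acc n => acc ++ [n]) [] ++ [newV]) (g + 1) 0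
        then true else seq)
      false = adjDiff (p ++ [newV])
  rw [foldl_copy, List.nil_append]
  set l := p ++ [newV] with hl
  rw [PySem.List.pyRange_one, List.foldl_map, foldl_latch, Bool.false_or]
  have hn : ((l.length : Int) - 1 - 0).toNat = l.length - 1 := by omega
  rw [hn, ← any_range_adj l]
  apply List.any_congr
  · rfl
  intro k
  have h1 : PySem.List.pyGetD l (0 + (k : Int)) 0 = l.getD k 0 := by
    simp [PySem.List.pyGetD_natCast]
  have h2 : PySem.List.pyGetD l (0 + (k : Int) + 1) 0 = l.getD (k + 1) 0 := by
    have he : ((0 : Int) + (k : Int) + 1) = ((k + 1 : Nat) : Int) := by push_cast; ring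
    rw [he]
    simpa using PySem.List.pyGetD_natCast l (k + 1) 0
  simp only [h1, h2]

theorem adjDiff_cons_eq_any (a : Int) (t : List Int) :
    adjDiff (a :: t) = t.any (fun x => x ≠ a) := by
  induction t generalizing a with
  | nil => simp [adjDiff]
  | cons b t' ih =>
    rw [show adjDiff (a :: b :: t') = ((a ≠ b : Bool) || adjDiff (b :: t')) from rfl, ih,
      List.any_cons]
    by_cases h : a = b
    · subst h; simp
    · have hb : (decide ¬a = b) = true := by simp [h]
      have hb' : (decide ¬b = a) = true := by simp [Ne.symm h]
      simp only [ne_eq, hb, hb', Bool.true_or]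

-- ===== VERDICT (by name: the statement is the Claim_ definition above) =====
theorem isNotSequential_spec : Claim_equal_isNotSequential := by
  intro p newV _
  unfold Spec_isNotSequential isNotSequential_alt
  rw [isNotSequential_eq_adjDiff]
  cases p with
  | nil => simp [adjDiff]
  | cons a t =>
    rw [List.cons_append, adjDiff_cons_eq_any]
    simp
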